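-- pv_equiv track=rewrite | github.com/bvrvr/omgtu | олимпиады/tau-ceti.py | create_palindrome
-- ===== SOURCE A (Python) =====
-- def create_palindrome(word):
--     palindrome = ""
--     length = len(word)
--     middle_index = length // 2
--
--     if length % 2 == 0:
--         palindrome += word[middle_index]
--         for i in range(1, middle_index + 1):
--             palindrome += word[middle_index - i]
--             if i < middle_index:
--                 palindrome += word[middle_index + i]
--     else:
--         palindrome += word[middle_index]
--         for i in range(1, middle_index + 1):
--             palindrome += word[middle_index - i]
--             if middle_index + i < length:
--                 palindrome += word[middle_index + i]
--
--     return palindrome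
-- ===== SOURCE B (Python) =====
-- def create_palindrome(word):
--     m = len(word) // 2
--     first = word[m]
--     left = word[:m][::-1]
--     right = word[m + 1:]
--     pairs = "".join(a + b for a, b in zip(left, right))
--     return first + pairs + left[len(right):]
-- ===== Notes on version B (the rewrite author's own statement) =====
-- stated objective: simpler
-- what changed: Replaces A's even/odd branching, index arithmetic and character-by-character += loop with slice-reverse-and-zip: the middle char, then the reversed left half zipped with the right half, then the leftover left chars via one slice.
import Mathlib
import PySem

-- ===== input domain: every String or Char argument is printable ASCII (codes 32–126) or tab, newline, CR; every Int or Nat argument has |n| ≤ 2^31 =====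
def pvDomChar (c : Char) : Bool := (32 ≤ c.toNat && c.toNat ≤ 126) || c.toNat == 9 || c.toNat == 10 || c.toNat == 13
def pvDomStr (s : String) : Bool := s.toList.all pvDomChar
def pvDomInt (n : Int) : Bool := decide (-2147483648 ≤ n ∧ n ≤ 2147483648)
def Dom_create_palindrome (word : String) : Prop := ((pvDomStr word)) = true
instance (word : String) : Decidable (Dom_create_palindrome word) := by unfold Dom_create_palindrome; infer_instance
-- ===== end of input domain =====

-- B rewrites A as slice-reverse-and-zip (no even/odd branches, no per-index arithmetic); equal wherever A returns.

-- ===== PORT A =====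
-- literal transliteration of A: start from word[middle_index], then loop i = 1 .. middle_index,
-- appending one or two characters per step, with A's separate even/odd branches.
def create_palindrome (word : String) : String :=
  let w := word.toList
  let palindrome : List Char := []
  let length : Int := PySem.List.len w
  let middle_index : Int := PySem.Int.floordiv length 2
  let palindrome :=
    if PySem.Int.mod length 2 = 0 then
      -- word[i] raises only outside Pre_; pyGetD is exact under Pre_ (every index used is in range)
      let palindrome := palindrome ++ [PySem.List.pyGetD w middle_index ' ']
      (PySem.List.pyRange 1 (middle_index + 1) 1).foldl (fun acc i =>
        let acc := acc ++ [PySem.List.pyGetD w (middle_index - i) ' ']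
        if i < middle_index then acc ++ [PySem.List.pyGetD w (middle_index + i) ' '] else acc)
        palindrome
    else
      let palindrome := palindrome ++ [PySem.List.pyGetD w middle_index ' ']
      (PySem.List.pyRange 1 (middle_index + 1) 1).foldl (fun acc i =>
        let acc := acc ++ [PySem.List.pyGetD w (middle_index - i) ' ']
        if middle_index + i < length then acc ++ [PySem.List.pyGetD w (middle_index + i) ' '] else acc)
        palindrome
  String.ofList palindrome

-- ===== PORT B =====
-- literal transliteration of B: middle char, reversed left half zipped with the right half, leftover left chars.
def create_palindrome_alt (word : String) : String :=
  let w := word.toList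
  let m : Int := PySem.Int.floordiv (PySem.List.len w) 2
  let first := PySem.List.pyGetD w m ' '        -- word[m]; raises only outside Pre_
  let left := (PySem.List.slice? (PySem.List.slice w none (some m)) none none (-1)).getD []  -- word[:m][::-1]
  let right := PySem.List.slice w (some (m + 1)) none                                        -- word[m+1:]
  let pairs := (left.zip right).flatMap (fun p => [p.1, p.2])   -- "".join(a + b for a, b in zip(left, right))
  String.ofList ([first] ++ pairs ++ PySem.List.slice left (some (PySem.List.len right)) none)

-- ===== PRECONDITION & SPEC =====
-- Pre_ excludes exactly the empty string, on which Python's word[0] raises IndexError in both A and B.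
def Pre_create_palindrome (word : String) : Prop := word.toList ≠ []
instance (word : String) : Decidable (Pre_create_palindrome word) := by unfold Pre_create_palindrome; infer_instance
def pvWitness_create_palindrome : String := "abcd"
def Spec_create_palindrome (word : String) (out : String) : Prop := out = create_palindrome_alt word
instance (word : String) (out : String) : Decidable (Spec_create_palindrome word out) := by unfold Spec_create_palindrome; infer_instance

-- ===== CLAIM (what is proved, stated in full; the proofs are below) =====
def Claim_equal_create_palindrome : Prop := ∀ (word : String), Dom_create_palindrome word → Pre_create_palindrome word → Spec_create_palindrome word (create_palindrome word)

-- ===== LEMMAS AND PROOFS =====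

-- Interleave invariant: the one-or-two-appends-per-step fold over L's indices equals the
-- zip interleave followed by L's leftover tail (needs |R| ≤ |L|).
lemma interleave_fold (L R : List Char) (h : R.length ≤ L.length) (acc : List Char) :
    (List.range L.length).foldl
      (fun a k =>
        if k < R.length then (a ++ [L.getD k ' ']) ++ [R.getD k ' '] else a ++ [L.getD k ' ']) acc
      = acc ++ (L.zip R).flatMap (fun p => [p.1, p.2]) ++ L.drop R.length := by
  induction L generalizing R acc with
  | nil =>
    have hR : R = [] := List.eq_nil_of_length_eq_zero (Nat.le_zero.mp h)
    simp [hR]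
  | cons a L ih =>
    cases R with
    | nil =>
      have := ih [] (by simp) (acc ++ [a])
      simpa [List.range_succ_eq_map, List.foldl_map, Nat.succ_eq_add_one] using this
    | cons b R =>
      have h' : R.length ≤ L.length := by simpa using h
      have := ih R h' ((acc ++ [a]) ++ [b])
      simpa [List.range_succ_eq_map, List.foldl_map, Nat.succ_eq_add_one] using this

lemma left_getD (l : List Char) (m k : Nat) (hm : m ≤ l.length) (hk : k < m) :
    ((l.take m).reverse).getD k ' ' = l.getD (m - 1 - k) ' ' := by
  have h1 : k < ((l.take m).reverse).length := by simpa [Nat.min_eq_left hm] using hk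
  have h2 : m - 1 - k < l.length := by omega
  rw [List.getD_eq_getElem _ _ h1, List.getD_eq_getElem _ _ h2]
  rw [List.getElem_reverse, List.getElem_take]
  congr 1
  simp [Nat.min_eq_left hm]

lemma right_getD (l : List Char) (m k : Nat) :
    ((l.drop (m + 1)).getD k ' ') = l.getD (m + 1 + k) ' ' := by
  rw [List.getD_eq_getElem?_getD, List.getD_eq_getElem?_getD, List.getElem?_drop]

theorem create_palindrome_spec : Claim_equal_create_palindrome := by
  unfold Claim_equal_create_palindrome
  intro word _ hpre
  unfold Pre_create_palindrome at hpre
  unfold Spec_create_palindrome create_palindrome create_palindrome_alt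
  simp only []
  set l := word.toList with hl
  have hn : 0 < l.length := List.length_pos_iff.mpr hpre
  set n := l.length with hn'
  set m := n / 2 with hm'
  have hmi : PySem.Int.floordiv (PySem.List.len l) 2 = ((m : Nat) : Int) := by
    rw [PySem.List.len_eq]
    exact_mod_cast PySem.Int.floordiv_natCast n 2
  have hmod : PySem.Int.mod (PySem.List.len l) 2 = ((n % 2 : Nat) : Int) := by
    rw [PySem.List.len_eq]
    exact_mod_cast PySem.Int.mod_natCast n 2
  have hmlt : m < n := Nat.div_lt_self hn (by norm_num)
  -- the common pieces
  set L : List Char := (l.take m).reverse with hL'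
  set R : List Char := l.drop (m + 1) with hR'
  have hLlen : L.length = m := by simp [hL']; omega
  have hRlen : R.length = n - (m + 1) := by simp [hR']; omega
  have hRL : R.length ≤ L.length := by omega
  -- B's value
  have hB : ([PySem.List.pyGetD l (PySem.Int.floordiv (PySem.List.len l) 2) ' ']
      ++ (((PySem.List.slice? (PySem.List.slice l none (some (PySem.Int.floordiv (PySem.List.len l) 2))) none none (-1)).getD []).zip
            (PySem.List.slice l (some (PySem.Int.floordiv (PySem.List.len l) 2 + 1)) none)).flatMap (fun p => [p.1, p.2])
      ++ PySem.List.slice ((PySem.List.slice? (PySem.List.slice l none (some (PySem.Int.floordiv (PySem.List.len l) 2))) none none (-1)).getD [])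
           (some (PySem.List.len (PySem.List.slice l (some (PySem.Int.floordiv (PySem.List.len l) 2 + 1)) none))) none)
      = [l.getD m ' '] ++ (L.zip R).flatMap (fun p => [p.1, p.2]) ++ L.drop R.length := by
    rw [hmi]
    have hc : ((m : Int) + 1) = (((m + 1 : Nat)) : Int) := by push_cast; ring
    rw [hc, PySem.List.slice_to_natCast, PySem.List.slice_from_natCast,
        PySem.List.slice?_none_none_neg_one]
    simp only [Option.getD_some, ← hL', ← hR', PySem.List.len_eq, PySem.List.pyGetD_natCast,
        PySem.List.slice_from_natCast]
  rw [hmi, hmod] at *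
  -- A's fold, both parities, equals the interleave form
  have hA : ∀ (cond : Int → Prop) [DecidablePred cond],
      (∀ k : Nat, k < m → (cond (1 + (k : Int)) ↔ k < R.length)) →
      (PySem.List.pyRange 1 ((m : Int) + 1) 1).foldl (fun acc i =>
          if cond i then (acc ++ [PySem.List.pyGetD l ((m : Int) - i) ' ']) ++ [PySem.List.pyGetD l ((m : Int) + i) ' ']
          else acc ++ [PySem.List.pyGetD l ((m : Int) - i) ' '])
        ([] ++ [PySem.List.pyGetD l (m : Int) ' '])
      = [l.getD m ' '] ++ (L.zip R).flatMap (fun p => [p.1, p.2]) ++ L.drop R.length := by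
    intro cond _ hcond
    have hrange : ((m : Int) + 1 - 1).toNat = m := by omega
    rw [PySem.List.pyRange_one, hrange, List.foldl_map]
    rw [PySem.List.foldl_congr_mem _ _ (fun a k =>
        if k < R.length then (a ++ [L.getD k ' ']) ++ [R.getD k ' '] else a ++ [L.getD k ' ']) _ ?_]
    · have hint := interleave_fold L R hRL ([] ++ [PySem.List.pyGetD l (m : Int) ' '])
      rw [hLlen] at hint
      rw [hint]
      simp [PySem.List.pyGetD_natCast]
    · intro acc k hk
      have hkm : k < m := List.mem_range.mp hk
      have h1 : (m : Int) - (1 + (k : Int)) = ((m - 1 - k : Nat) : Int) := by omega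
      have h2 : (m : Int) + (1 + (k : Int)) = ((m + 1 + k : Nat) : Int) := by omega
      rw [h1, h2]
      simp only [PySem.List.pyGetD_natCast]
      rw [← left_getD l m k (Nat.le_of_lt hmlt) hkm, ← hL']
      by_cases hc : cond (1 + (k : Int))
      · rw [if_pos hc, if_pos ((hcond k hkm).mp hc)]
        rw [← right_getD l m k, ← hR']
      · rw [if_neg hc, if_neg (fun hlt => hc ((hcond k hkm).mpr hlt))]
  have hlen : PySem.List.len l = ((n : Nat) : Int) := by simp [PySem.List.len_eq]; omega
  rw [hlen]
  by_cases hpar : ((n % 2 : Nat) : Int) = 0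
  · rw [if_pos hpar, hB]
    refine congrArg String.ofList (hA (fun i => i < (m : Int)) ?_)
    intro k hk
    have : n % 2 = 0 := by exact_mod_cast hpar
    omega
  · rw [if_neg hpar, hB]
    refine congrArg String.ofList (hA (fun i => (m : Int) + i < ((n : Nat) : Int)) ?_)
    intro k hk
    have : n % 2 ≠ 0 := fun h => hpar (by exact_mod_cast h)
    constructor
    · intro h; omega
    · intro h; omega
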